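-- pv_equiv track=rewrite | github.com/HDU-Course/hdu-term-project-helper | 算法设计与分析/作业/homework1T1.py | minPointDistance
-- ===== SOURCE A (Python) =====
-- def minPointDistance(List,left,right):
-- 	if left == right:
-- 		return 999999
-- 	elif right - left == 1:
-- 		return List[right] - List[left]
-- 	else:
-- 		mid = (left+right)//2
-- 		leftMinDistance = minPointDistance(List,left,mid)#得到左边的最小值
-- 		rightMinDistance = minPointDistance(List,mid+1,right)#得到右边的最小值
-- 		ans = min(leftMinDistance,rightMinDistance)
-- 		tmp = min(List[mid]-List[mid-1],List[mid+1]-List[mid])#如果中轴线附近有更小的值，就更新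
-- 		if tmp < ans:
-- 			tmp = ans
-- 	return ans
--
-- 	'''
-- 		另一种写法 略啰嗦 舍去
-- 		if len(List)%2 == 0: #如果是偶数
-- 			s1 = List[mid+1] - List[mid]
-- 			res = min(leftMinDistance,rightMinDistance,s1)
-- 			start = mid
-- 			end = mid+1
-- 		else:
-- 			s1 = List[mid+1] - List[mid]
-- 			s2 = List[mid] - List[mid-1]
-- 			if s1 < s2:
-- 				start = mid
-- 				end = mid+1
-- 			else:
-- 				start = mid-1
-- 				end = mid
-- 			res = min(leftMinDistance,rightMinDistance,s1,s2)
-- 	'''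
-- ===== SOURCE B (Python) =====
-- def minPointDistance(List, left, right):
--     # Iterative version: explicit stack of (lo, hi) ranges + running minimum accumulator.
--     ans = None
--     stack = [(left, right)]
--     while stack:
--         lo, hi = stack.pop()
--         if lo == hi:
--             v = 999999
--         elif hi - lo == 1:
--             v = List[hi] - List[lo]
--         else:
--             mid = (lo + hi) // 2
--             stack.append((lo, mid))
--             stack.append((mid + 1, hi))
--             continue
--         ans = v if ans is None else min(ans, v)
--     return ans
-- ===== Notes on version B (the rewrite author's own statement) =====
-- stated objective: alternative
-- what changed: Replaces the divide-and-conquer recursion (combining child results with min) by an iterative worklist: an explicit stack of (lo,hi) ranges and a single running-minimum accumulator folded over the leaf ranges.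
import Mathlib
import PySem

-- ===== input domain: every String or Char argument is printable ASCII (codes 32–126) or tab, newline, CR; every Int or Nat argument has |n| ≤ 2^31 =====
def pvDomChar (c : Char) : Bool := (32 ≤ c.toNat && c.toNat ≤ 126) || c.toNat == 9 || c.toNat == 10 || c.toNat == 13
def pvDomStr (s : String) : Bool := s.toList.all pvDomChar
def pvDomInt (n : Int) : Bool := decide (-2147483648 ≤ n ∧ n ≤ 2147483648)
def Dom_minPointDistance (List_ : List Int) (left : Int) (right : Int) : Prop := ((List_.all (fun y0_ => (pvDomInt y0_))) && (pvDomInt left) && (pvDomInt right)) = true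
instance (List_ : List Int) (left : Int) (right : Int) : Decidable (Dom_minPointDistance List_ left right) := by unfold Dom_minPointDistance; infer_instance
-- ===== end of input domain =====

-- B replaces A's recursion by an explicit stack of (lo,hi) ranges with a running-min accumulator
-- (same split, same values — an alternative decomposition, not a speed or bug fix).

-- ===== PORT A =====
-- List indexing: pyGet? …).getD 0 — exact wherever Python does not raise IndexError
-- (Pre_ keeps all indices in Python's valid range, incl. negative wraparound).
-- Python's recursion diverges when right < left with right ≠ left reachable; the 'if h : 2 ≤ …'
-- guard only makes the definition total (returns 0 there, outside Pre_).
def minPointDistance (List_ : List Int) (left : Int) (right : Int) : Int :=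
  if left = right then 999999
  else if right - left = 1 then
    (PySem.List.pyGet? List_ right).getD 0 - (PySem.List.pyGet? List_ left).getD 0
  else if _h : 2 ≤ right - left then
    let mid := PySem.Int.floordiv (left + right) 2
    let leftMinDistance := minPointDistance List_ left mid
    let rightMinDistance := minPointDistance List_ (mid + 1) right
    let ans := min leftMinDistance rightMinDistance
    -- Python computes tmp and then 'if tmp < ans: tmp = ans' — rebinds tmp, ans unchanged
    let _tmp := min ((PySem.List.pyGet? List_ mid).getD 0 - (PySem.List.pyGet? List_ (mid - 1)).getD 0)
                    ((PySem.List.pyGet? List_ (mid + 1)).getD 0 - (PySem.List.pyGet? List_ mid).getD 0)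
    ans
  else 0
termination_by (right - left).toNat
decreasing_by
  · have hm : PySem.Int.floordiv (left + right) 2 = (left + right) / 2 :=
      PySem.Int.floordiv_eq_ediv_of_pos (by norm_num)
    simp only [hm]; omega
  · have hm : PySem.Int.floordiv (left + right) 2 = (left + right) / 2 :=
      PySem.Int.floordiv_eq_ediv_of_pos (by norm_num)
    simp only [hm]; omega

-- ===== PORT B =====
-- 'ans = v if ans is None else min(ans, v)'
def pvMerge (acc : Option Int) (v : Int) : Option Int :=
  match acc with
  | none => some v
  | some a => some (min a v)

-- the while-stack loop; stack head = top (Python list end); pushes in the same order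
def pvLoop (List_ : List Int) (stack : List (Int × Int)) (acc : Option Int) : Option Int :=
  match stack with
  | [] => acc
  | (lo, hi) :: rest =>
    if lo = hi then pvLoop List_ rest (pvMerge acc 999999)
    else if hi - lo = 1 then
      pvLoop List_ rest (pvMerge acc ((PySem.List.pyGet? List_ hi).getD 0 - (PySem.List.pyGet? List_ lo).getD 0))
    else if h : 2 ≤ hi - lo then
      let mid := PySem.Int.floordiv (lo + hi) 2
      pvLoop List_ ((mid + 1, hi) :: (lo, mid) :: rest) acc
    else pvLoop List_ rest acc  -- Python loops forever here (hi < lo); totality guard, outside Pre_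
termination_by (stack.map (fun p => 2 * (p.2 - p.1).toNat + 1)).sum
decreasing_by
  all_goals
    (have hm : PySem.Int.floordiv (lo + hi) 2 = (lo + hi) / 2 :=
       PySem.Int.floordiv_eq_ediv_of_pos (by norm_num)
     simp only [hm, List.map_cons, List.sum_cons]
     omega)

def minPointDistance_alt (List_ : List Int) (left : Int) (right : Int) : Int :=
  match pvLoop List_ [(left, right)] none with
  | some a => a
  | none => 0  -- Python would return None; unreachable: the seeded stack always yields a leaf

-- ===== PRECONDITION & SPEC =====
-- Pre_ is exactly where Python A returns: elsewhere it raises IndexError (an index outside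
-- Python's valid range, incl. negative wraparound) or RecursionError (right < left ≠ right).
def Pre_minPointDistance (List_ : List Int) (left : Int) (right : Int) : Prop :=
  left = right ∨ (left ≤ right ∧ -(List_.length : Int) ≤ left ∧ right < List_.length)
instance (List_ : List Int) (left : Int) (right : Int) : Decidable (Pre_minPointDistance List_ left right) := by unfold Pre_minPointDistance; infer_instance
def pvWitness_minPointDistance : List Int × Int × Int := ([1, 3, 4, 8], 0, 3)

def Spec_minPointDistance (List_ : List Int) (left : Int) (right : Int) (out : Int) : Prop := out = minPointDistance_alt List_ left right
instance (List_ : List Int) (left : Int) (right : Int) (out : Int) : Decidable (Spec_minPointDistance List_ left right out) := by unfold Spec_minPointDistance; infer_instance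

-- ===== CLAIM (what is proved, stated in full; the proofs are below) =====
def Claim_equal_minPointDistance : Prop := ∀ (List_ : List Int) (left : Int) (right : Int), Dom_minPointDistance List_ left right → Pre_minPointDistance List_ left right → Spec_minPointDistance List_ left right (minPointDistance List_ left right)

-- ===== LEMMAS AND PROOFS =====

theorem pvMerge_merge (acc : Option Int) (x y : Int) :
    pvMerge (pvMerge acc x) y = pvMerge acc (min y x) := by
  cases acc <;> simp [pvMerge, min_comm x y, min_assoc]

-- loop invariant: if every stacked range has lo ≤ hi, the loop folds A's value of each range
-- into the accumulator
theorem pvLoop_eq_foldl (List_ : List Int) (stack : List (Int × Int)) (acc : Option Int) :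
    (∀ p ∈ stack, p.1 ≤ p.2) →
    pvLoop List_ stack acc =
      stack.foldl (fun a p => pvMerge a (minPointDistance List_ p.1 p.2)) acc := by
  induction stack, acc using pvLoop.induct List_ with
  | case1 acc => intro _; simp [pvLoop]
  | case2 acc hi rest ih =>
    intro hst
    rw [pvLoop]
    simp only [if_true, List.foldl_cons]
    rw [ih (fun p hp => hst p (List.mem_cons_of_mem _ hp))]
    rw [minPointDistance]
    simp
  | case3 acc lo hi rest h1 h2 ih =>
    intro hst
    rw [pvLoop]
    simp only [h1, h2, if_true, if_false, List.foldl_cons]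
    rw [ih (fun p hp => hst p (List.mem_cons_of_mem _ hp))]
    rw [minPointDistance]
    simp [h1, h2]
  | case4 acc lo hi rest h1 h2 h3 mid ih =>
    intro hst
    have hmid : mid = PySem.Int.floordiv (lo + hi) 2 := rfl
    have hm : PySem.Int.floordiv (lo + hi) 2 = (lo + hi) / 2 :=
      PySem.Int.floordiv_eq_ediv_of_pos (by norm_num)
    have hb1 : lo ≤ mid := by rw [hmid, hm]; omega
    have hb2 : mid + 1 ≤ hi := by rw [hmid, hm]; omega
    have hA : minPointDistance List_ lo hi =
        min (minPointDistance List_ lo mid) (minPointDistance List_ (mid + 1) hi) := by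
      rw [minPointDistance, if_neg h1, if_neg h2, dif_pos h3]
    rw [pvLoop]
    simp only [if_neg h1, if_neg h2, dif_pos h3]
    rw [ih]
    · simp only [List.foldl_cons]
      rw [pvMerge_merge, ← hA]
    · intro p hp
      simp only [List.mem_cons] at hp
      rcases hp with rfl | rfl | hp
      · simpa using hb2
      · simpa using hb1
      · exact hst p (List.mem_cons_of_mem _ hp)
  | case5 acc lo hi rest h1 h2 h3 =>
    intro hst
    have hlohi : lo ≤ hi := hst (lo, hi) (List.mem_cons_self ..)
    omega

-- ===== VERDICT (by name: the statement is the Claim_ definition above) =====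
theorem minPointDistance_spec : Claim_equal_minPointDistance := by
  intro List_ left right _ hpre
  unfold Spec_minPointDistance minPointDistance_alt
  rw [pvLoop_eq_foldl List_ [(left, right)] none (by rintro p hp; simp at hp; subst hp; rcases hpre with h | h <;> simp <;> omega)]
  simp [pvMerge]
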